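-- pv_equiv track=rewrite | github.com/architgore050/Vityarthi-Project | 38.py | stepsCounter
-- ===== SOURCE A (Python) =====
-- def stepsCounter (s, terms):
--     steps=1
--     if s<1:
--
--         steps+=1
--         return steps
--
--     i=1
--     steps+=1
--
--     output=0
--     steps+=1
--
--     steps+=1
--     while i<=terms:
--         steps+=1
--
--         output += i**(-s)
--         steps+=4
--
--         i+=1
--         steps+=2
--
--     steps+=1
--     return steps
-- ===== SOURCE B (Python) =====
-- def stepsCounter(s, terms):
--     if s < 1:
--         return 2
--     return 5 + 7 * max(terms, 0)
-- ===== Notes on version B (the rewrite author's own statement) =====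
-- stated objective: faster
-- what changed: Replaced the step-counting while loop with the closed-form value 2 if s<1 else 5+7*max(terms,0).
import Mathlib
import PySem

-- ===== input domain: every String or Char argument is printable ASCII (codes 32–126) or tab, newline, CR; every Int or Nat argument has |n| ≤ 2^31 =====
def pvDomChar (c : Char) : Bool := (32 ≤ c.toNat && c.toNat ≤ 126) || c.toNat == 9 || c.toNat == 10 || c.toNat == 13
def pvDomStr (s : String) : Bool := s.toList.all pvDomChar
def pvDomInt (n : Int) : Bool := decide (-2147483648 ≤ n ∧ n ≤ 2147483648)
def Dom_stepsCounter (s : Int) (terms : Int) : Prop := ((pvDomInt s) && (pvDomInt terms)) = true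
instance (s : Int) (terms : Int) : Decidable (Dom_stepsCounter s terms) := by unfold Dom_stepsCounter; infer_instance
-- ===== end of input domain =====

-- B replaces A's step-counting loop with a closed-form formula (O(1) instead of O(terms)).


-- ===== PORT A =====
-- A's while loop; `output` (a float partial sum) is carried in Python but never
-- returned or read, so it is dropped here; each iteration adds 1+4+2 = 7 to steps.
def stepsLoop (i : Int) (terms : Int) (steps : Int) : Int :=
  if _h : i ≤ terms then stepsLoop (i + 1) terms (steps + 7) else steps
termination_by (terms + 1 - i).toNat
decreasing_by omega

def stepsCounter (s : Int) (terms : Int) : Int :=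
  -- steps = 1
  if s < 1 then 1 + 1        -- steps += 1; return steps
  else
    -- i = 1; steps += 1; output = 0; steps += 1; steps += 1  (steps = 4 before the loop)
    stepsLoop 1 terms 4 + 1  -- while …; steps += 1; return steps

-- ===== PORT B =====
def stepsCounter_alt (s : Int) (terms : Int) : Int :=
  if s < 1 then 2 else 5 + 7 * max terms 0

-- ===== PRECONDITION & SPEC =====
def Spec_stepsCounter (s : Int) (terms : Int) (out : Int) : Prop := out = stepsCounter_alt s terms
instance (s : Int) (terms : Int) (out : Int) : Decidable (Spec_stepsCounter s terms out) := by unfold Spec_stepsCounter; infer_instance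

-- ===== CLAIM =====
def Claim_equal_stepsCounter : Prop := ∀ (s : Int) (terms : Int), Dom_stepsCounter s terms → Spec_stepsCounter s terms (stepsCounter s terms)

-- ===== LEMMAS AND PROOFS =====
theorem stepsLoop_closed (i terms steps : Int) :
    stepsLoop i terms steps = steps + 7 * max (terms + 1 - i) 0 := by
  by_cases h : i ≤ terms
  · have hfuel : (terms + 1 - (i + 1)).toNat < (terms + 1 - i).toNat := by omega
    rw [stepsLoop.eq_def, dif_pos h, stepsLoop_closed (i + 1) terms (steps + 7)]
    have h1 : max (terms + 1 - i) 0 = terms + 1 - i := by omega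
    have h2 : max (terms + 1 - (i + 1)) 0 = terms - i := by omega
    rw [h1, h2]; ring
  · rw [stepsLoop.eq_def, dif_neg h]
    have : max (terms + 1 - i) 0 = 0 := by omega
    omega
termination_by (terms + 1 - i).toNat
decreasing_by omega

-- ===== VERDICT =====
theorem stepsCounter_spec : Claim_equal_stepsCounter := by
  intro s terms _
  unfold Spec_stepsCounter stepsCounter stepsCounter_alt
  split_ifs with h
  · rfl
  · rw [stepsLoop_closed]
    omega
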